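-- pv_equiv track=rewrite | github.com/thomaswetzler/vLLM-Sleep-Proxy | src/ops-ui/app/snapshot.py | _engine_component_from_models
-- ===== SOURCE A (Python) =====
-- from typing import Any, Dict, List, Optional, Tuple
--
-- def _engine_component_from_models(models: List[Dict[str, Any]]) -> Dict[str, Any]:
--     """Represent the serving engines as one diagram box."""
--     if not models:
--         return {
--             "id": "vllm-engines",
--             "label": "vLLM Engines",
--             "status": "down",
--             "detail": "no models discovered",
--         }
--
--     awake = sum(1 for item in models if item.get("state") == "awake")
--     sleeping = sum(1 for item in models if item.get("state") == "sleeping")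
--     mixed = sum(1 for item in models if item.get("state") == "mixed")
--
--     detail = f"{awake} awake, {sleeping} sleeping"
--     if mixed:
--         detail += f", {mixed} mixed"
--
--     return {
--         "id": "vllm-engines",
--         "label": "vLLM Engines",
--         "status": "ok" if models else "down",
--         "detail": detail,
--     }
-- ===== SOURCE B (Python) =====
-- def _engine_component_from_models(models):
--     """Represent the serving engines as one diagram box."""
--     if not models:
--         return {
--             "id": "vllm-engines",
--             "label": "vLLM Engines",
--             "status": "down",
--             "detail": "no models discovered",
--         }
--
--     awake = sleeping = mixed = 0
--     for item in models:
--         state = item.get("state")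
--         if state == "awake":
--             awake += 1
--         elif state == "sleeping":
--             sleeping += 1
--         elif state == "mixed":
--             mixed += 1
--
--     detail = f"{awake} awake, {sleeping} sleeping"
--     if mixed:
--         detail += f", {mixed} mixed"
--
--     return {
--         "id": "vllm-engines",
--         "label": "vLLM Engines",
--         "status": "ok",
--         "detail": detail,
--     }
-- ===== Notes on version B (the rewrite author's own statement) =====
-- stated objective: simpler
-- what changed: Replaces A's three separate generator scans of the model list by one explicit loop that classifies each model's state once and maintains all three counters simultaneously (single pass instead of three).
import Mathlib
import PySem

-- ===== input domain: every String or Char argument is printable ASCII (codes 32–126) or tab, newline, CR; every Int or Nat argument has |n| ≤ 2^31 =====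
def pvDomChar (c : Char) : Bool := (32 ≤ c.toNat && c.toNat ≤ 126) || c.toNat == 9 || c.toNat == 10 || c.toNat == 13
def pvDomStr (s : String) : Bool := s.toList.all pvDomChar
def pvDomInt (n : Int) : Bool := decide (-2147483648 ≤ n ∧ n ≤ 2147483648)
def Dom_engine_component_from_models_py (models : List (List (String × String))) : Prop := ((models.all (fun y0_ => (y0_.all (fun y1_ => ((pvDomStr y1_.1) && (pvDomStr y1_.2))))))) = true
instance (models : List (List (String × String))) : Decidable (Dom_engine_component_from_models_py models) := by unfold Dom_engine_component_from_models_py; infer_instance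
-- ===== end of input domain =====

-- B replaces A's three separate scans of the model list by one loop that classifies each
-- state once and keeps all three counters; return value is identical (simpler, single pass).

-- ===== PORT A =====
def engine_component_from_models_py (models : List (List (String × String))) : List (String × String) :=
  if models = [] then
    [("id", "vllm-engines"), ("label", "vLLM Engines"),
     ("status", "down"), ("detail", "no models discovered")]
  else
    let awake : Int := models.foldl
      (fun acc item => if item.lookup "state" == some "awake" then acc + 1 else acc) 0
    let sleeping : Int := models.foldl
      (fun acc item => if item.lookup "state" == some "sleeping" then acc + 1 else acc) 0
    let mixed : Int := models.foldl
      (fun acc item => if item.lookup "state" == some "mixed" then acc + 1 else acc) 0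
    let detail := PySem.Int.toStr awake ++ " awake, " ++ PySem.Int.toStr sleeping ++ " sleeping"
    let detail := if mixed ≠ 0 then detail ++ ", " ++ PySem.Int.toStr mixed ++ " mixed" else detail
    [("id", "vllm-engines"), ("label", "vLLM Engines"),
     ("status", if models ≠ [] then "ok" else "down"), ("detail", detail)]

-- ===== PORT B =====
-- one pass: classify each item's state once, update the matching counter
def ecfmTally (models : List (List (String × String))) (acc : Int × Int × Int) : Int × Int × Int :=
  models.foldl
    (fun acc item =>
      let st := item.lookup "state"
      if st == some "awake" then (acc.1 + 1, acc.2.1, acc.2.2)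
      else if st == some "sleeping" then (acc.1, acc.2.1 + 1, acc.2.2)
      else if st == some "mixed" then (acc.1, acc.2.1, acc.2.2 + 1)
      else acc) acc

def engine_component_from_models_py_alt (models : List (List (String × String))) : List (String × String) :=
  if models = [] then
    [("id", "vllm-engines"), ("label", "vLLM Engines"),
     ("status", "down"), ("detail", "no models discovered")]
  else
    let t := ecfmTally models (0, 0, 0)
    let awake := t.1
    let sleeping := t.2.1
    let mixed := t.2.2
    let detail := PySem.Int.toStr awake ++ " awake, " ++ PySem.Int.toStr sleeping ++ " sleeping"
    let detail := if mixed ≠ 0 then detail ++ ", " ++ PySem.Int.toStr mixed ++ " mixed" else detail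
    [("id", "vllm-engines"), ("label", "vLLM Engines"),
     ("status", "ok"), ("detail", detail)]

-- ===== PRECONDITION & SPEC =====
def Spec_engine_component_from_models_py (models : List (List (String × String))) (out : List (String × String)) : Prop := out = engine_component_from_models_py_alt models
instance (models : List (List (String × String))) (out : List (String × String)) : Decidable (Spec_engine_component_from_models_py models out) := by unfold Spec_engine_component_from_models_py; infer_instance

-- ===== CLAIM (what is proved, stated in full; the proofs are below) =====
def Claim_equal_engine_component_from_models_py : Prop := ∀ (models : List (List (String × String))), Dom_engine_component_from_models_py models → Spec_engine_component_from_models_py models (engine_component_from_models_py models)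

-- ===== LEMMAS AND PROOFS =====
theorem ecfmTally_eq (models : List (List (String × String))) (a s m : Int) :
    ecfmTally models (a, s, m) =
      (models.foldl (fun acc item => if item.lookup "state" == some "awake" then acc + 1 else acc) a,
       models.foldl (fun acc item => if item.lookup "state" == some "sleeping" then acc + 1 else acc) s,
       models.foldl (fun acc item => if item.lookup "state" == some "mixed" then acc + 1 else acc) m) := by
  induction models generalizing a s m with
  | nil => rfl
  | cons item rest ih =>
    simp only [ecfmTally, List.foldl] at ih ⊢
    by_cases h1 : item.lookup "state" == some "awake"
    · have h2 : (item.lookup "state" == some "sleeping") = false := by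
        cases hb : item.lookup "state" == some "sleeping" <;> simp_all
      have h3 : (item.lookup "state" == some "mixed") = false := by
        cases hb : item.lookup "state" == some "mixed" <;> simp_all
      simp only [h1, h2, h3, if_true, if_false, Bool.false_eq_true]
      exact ih (a + 1) s m
    · by_cases h2 : item.lookup "state" == some "sleeping"
      · have h3 : (item.lookup "state" == some "mixed") = false := by
          cases hb : item.lookup "state" == some "mixed" <;> simp_all
        simp only [h1, h2, h3, Bool.false_eq_true, ite_false, ite_true]
        exact ih a (s + 1) m
      · by_cases h3 : item.lookup "state" == some "mixed"
        · simp only [h1, h2, h3, Bool.false_eq_true, ite_false, ite_true]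
          exact ih a s (m + 1)
        · simp only [h1, h2, h3, Bool.false_eq_true, ite_false]
          exact ih a s m

-- ===== VERDICT (by name: the statement is the Claim_ definition above) =====
theorem engine_component_from_models_py_spec : Claim_equal_engine_component_from_models_py := by
  intro models _
  unfold Spec_engine_component_from_models_py engine_component_from_models_py engine_component_from_models_py_alt
  by_cases h : models = []
  · simp [h]
  · simp [h, ecfmTally_eq]
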